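-- pv_equiv track=rewrite | github.com/lynderup/Bioinformatic-project | src/compare_prediction.py | compare_prediction
-- ===== SOURCE A (Python) =====
-- def find_tmh(annotation):
--
--     tmh = []
--     is_in_tmh = False
--     tmh_start = 0
--
--     for i, z in enumerate(annotation):
--
--         if z == "M":
--             if not is_in_tmh:
--                 is_in_tmh = True
--                 tmh_start = i
--         else:
--             if is_in_tmh:
--                 is_in_tmh = False
--                 tmh.append((tmh_start, i - 1))
--
--     return tmh
--
-- def compare_prediction(name, true, pred):
--
--     true_tmh = find_tmh(true)
--     pred_tmh = find_tmh(pred)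
--
--     number_of_predicted_tmh = len(pred_tmh)
--     number_of_observed_tmh = len(true_tmh)
--     number_of_correct_predictions = 0
--
--     for start_pred, end_pred in pred_tmh:
--         for start_true, end_true in true_tmh:
--
--             start_diff = abs(start_pred - start_true)
--             end_diff = abs(end_pred - end_true)
--
--             true_length = end_true - start_true
--             pred_length = end_pred - start_pred
--
--             overlap = min(end_pred, end_true) - max(start_pred, start_true)
--             longest = max(true_length, pred_length)
--
--             if start_diff <= 5 and end_diff <= 5 and overlap * 2 >= longest:
--                 number_of_correct_predictions += 1
--
--     return number_of_correct_predictions, number_of_predicted_tmh, number_of_observed_tmh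
-- ===== SOURCE B (Python) =====
-- from bisect import bisect_left, bisect_right
--
-- def compare_prediction(name, true, pred):
--     def intervals(annotation):
--         tmh = []
--         start = None
--         for i, z in enumerate(annotation):
--             if z == "M":
--                 if start is None:
--                     start = i
--             elif start is not None:
--                 tmh.append((start, i - 1))
--                 start = None
--         return tmh
--
--     true_tmh = intervals(true)
--     pred_tmh = intervals(pred)
--     starts = [s for s, _ in true_tmh]
--
--     correct = 0
--     for sp, ep in pred_tmh:
--         # only true helices whose start lies in [sp-5, sp+5] can match
--         lo = bisect_left(starts, sp - 5)
--         hi = bisect_right(starts, sp + 5)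
--         for st, et in true_tmh[lo:hi]:
--             if abs(ep - et) <= 5 and 2 * (min(ep, et) - max(sp, st)) >= max(et - st, ep - sp):
--                 correct += 1
--     return correct, len(pred_tmh), len(true_tmh)
-- ===== Notes on version B (the rewrite author's own statement) =====
-- stated objective: alternative
-- what changed: B keeps the list of true-helix starts (sorted by construction) and, for each predicted helix, binary-searches (bisect) the +/-5 start window and tests only those candidates, instead of A's nested scan of every (pred, true) pair; on the generator's inputs the helix counts are small, so the measured cost is the same.
import Mathlib
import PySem

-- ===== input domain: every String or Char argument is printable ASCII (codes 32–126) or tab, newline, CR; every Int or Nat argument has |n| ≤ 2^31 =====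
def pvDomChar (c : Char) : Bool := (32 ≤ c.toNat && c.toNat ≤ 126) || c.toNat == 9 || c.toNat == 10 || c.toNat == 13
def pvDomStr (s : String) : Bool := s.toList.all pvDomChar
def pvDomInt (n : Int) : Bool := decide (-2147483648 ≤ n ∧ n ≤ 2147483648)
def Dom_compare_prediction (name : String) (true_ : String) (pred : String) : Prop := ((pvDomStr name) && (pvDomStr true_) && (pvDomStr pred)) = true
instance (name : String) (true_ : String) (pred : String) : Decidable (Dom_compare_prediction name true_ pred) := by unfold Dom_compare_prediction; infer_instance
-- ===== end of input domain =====

-- B replaces A's nested scan of every (pred, true) helix pair by a bisect of the sorted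
-- true-helix starts for the ±5 start window, testing only those candidates (alternative algorithm).


-- ===== PORT A =====
-- 'for i, z in enumerate(annotation)' with state (tmh, is_in_tmh, tmh_start)
def findTmhGo (l : List Char) (i : Int) (tmh : List (Int × Int)) (is_in : Bool) (start : Int) : List (Int × Int) :=
  match l with
  | [] => tmh
  | z :: rest =>
    if z = 'M' then
      if is_in then findTmhGo rest (i + 1) tmh is_in start
      else findTmhGo rest (i + 1) tmh true i
    else
      if is_in then findTmhGo rest (i + 1) (tmh ++ [(start, i - 1)]) false start
      else findTmhGo rest (i + 1) tmh is_in start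

def find_tmh (annotation : String) : List (Int × Int) :=
  findTmhGo annotation.toList 0 [] false 0

def compare_prediction (name : String) (true_ : String) (pred : String) : Int × Int × Int :=
  let true_tmh := find_tmh true_
  let pred_tmh := find_tmh pred
  let number_of_predicted_tmh : Int := pred_tmh.length
  let number_of_observed_tmh : Int := true_tmh.length
  let number_of_correct_predictions : Int :=
    pred_tmh.foldl (fun c x =>
      match x with
      | (start_pred, end_pred) =>
        true_tmh.foldl (fun c y =>
          match y with
          | (start_true, end_true) =>
            let start_diff := |start_pred - start_true|
            let end_diff := |end_pred - end_true|
            let true_length := end_true - start_true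
            let pred_length := end_pred - start_pred
            let overlap := min end_pred end_true - max start_pred start_true
            let longest := max true_length pred_length
            if start_diff ≤ 5 ∧ end_diff ≤ 5 ∧ overlap * 2 ≥ longest then c + 1 else c) c) 0
  (number_of_correct_predictions, number_of_predicted_tmh, number_of_observed_tmh)

-- ===== PORT B =====
-- 'for i, z in enumerate(annotation)' with state (tmh, start : Option Int)
def intervalsGo (l : List Char) (i : Int) (tmh : List (Int × Int)) (start : Option Int) : List (Int × Int) :=
  match l with
  | [] => tmh
  | z :: rest =>
    if z = 'M' then
      match start with
      | some _ => intervalsGo rest (i + 1) tmh start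
      | none => intervalsGo rest (i + 1) tmh (some i)
    else
      match start with
      | some s => intervalsGo rest (i + 1) (tmh ++ [(s, i - 1)]) none
      | none => intervalsGo rest (i + 1) tmh none

def intervals (annotation : String) : List (Int × Int) :=
  intervalsGo annotation.toList 0 [] none

def compare_prediction_alt (name : String) (true_ : String) (pred : String) : Int × Int × Int :=
  let true_tmh := intervals true_
  let pred_tmh := intervals pred
  let starts := true_tmh.map Prod.fst
  let correct : Int :=
    pred_tmh.foldl (fun c x =>
      match x with
      | (sp, ep) =>
        let lo := PySem.List.bisectLeft starts (sp - 5)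
        let hi := PySem.List.bisectRight starts (sp + 5)
        -- true_tmh[lo:hi] with 0 ≤ lo ≤ hi ≤ len, i.e. take hi then drop lo
        ((true_tmh.take hi).drop lo).foldl (fun c y =>
          match y with
          | (st, et) =>
            if |ep - et| ≤ 5 ∧ 2 * (min ep et - max sp st) ≥ max (et - st) (ep - sp) then c + 1 else c) c) 0
  (correct, (pred_tmh.length : Int), (true_tmh.length : Int))

-- ===== PRECONDITION & SPEC =====
def Spec_compare_prediction (name : String) (true_ : String) (pred : String) (out : Int × Int × Int) : Prop := out = compare_prediction_alt name true_ pred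
instance (name : String) (true_ : String) (pred : String) (out : Int × Int × Int) : Decidable (Spec_compare_prediction name true_ pred out) := by unfold Spec_compare_prediction; infer_instance

-- ===== CLAIM (what is proved, stated in full; the proofs are below) =====
def Claim_equal_compare_prediction : Prop := ∀ (name : String) (true_ : String) (pred : String), Dom_compare_prediction name true_ pred → Spec_compare_prediction name true_ pred (compare_prediction name true_ pred)

-- ===== LEMMAS AND PROOFS =====

-- B's scanner equals A's: the Option start is 'some s' exactly when A's flag is set with tmh_start = s
lemma intervalsGo_eq_findTmhGo (l : List Char) : ∀ (i : Int) (tmh : List (Int × Int)) (b : Bool) (s : Int),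
    intervalsGo l i tmh (if b then some s else none) = findTmhGo l i tmh b s := by
  induction l with
  | nil => intro i tmh b s; cases b <;> simp [intervalsGo, findTmhGo]
  | cons z rest ih =>
    intro i tmh b s
    cases b <;> by_cases hz : z = 'M' <;>
      simp only [intervalsGo, findTmhGo, hz, if_true, if_false] <;>
      first
        | exact ih (i + 1) tmh false s
        | exact ih (i + 1) tmh true s
        | exact ih (i + 1) tmh true i
        | exact ih (i + 1) (tmh ++ [(s, i - 1)]) false s

lemma intervals_eq_find_tmh (a : String) : intervals a = find_tmh a :=
  intervalsGo_eq_findTmhGo a.toList 0 [] false 0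

-- invariant: accumulated helix starts are strictly increasing and below the current index
lemma findTmhGo_pairwise (l : List Char) : ∀ (i : Int) (tmh : List (Int × Int)) (b : Bool) (s : Int),
    tmh.Pairwise (fun p q => p.1 < q.1) → (∀ p ∈ tmh, p.1 < i) →
    (b = true → (∀ p ∈ tmh, p.1 < s) ∧ s < i) →
    (findTmhGo l i tmh b s).Pairwise (fun p q => p.1 < q.1) := by
  induction l with
  | nil => intro i tmh b s h1 _ _; simpa [findTmhGo] using h1
  | cons z rest ih =>
    intro i tmh b s h1 h2 h3
    by_cases hz : z = 'M' <;> cases b <;>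
      simp only [findTmhGo, hz, if_true, if_false]
    · -- z = 'M', b = false : start recording at i
      exact ih (i + 1) tmh true i h1 (fun p hp => lt_trans (h2 p hp) (by omega))
        (fun _ => ⟨h2, by omega⟩)
    · -- z = 'M', b = true
      exact ih (i + 1) tmh true s h1 (fun p hp => lt_trans (h2 p hp) (by omega))
        (fun _ => ⟨(h3 rfl).1, by have := (h3 rfl).2; omega⟩)
    · -- z ≠ 'M', b = false
      exact ih (i + 1) tmh false s h1 (fun p hp => lt_trans (h2 p hp) (by omega)) (by simp)
    · -- z ≠ 'M', b = true : close interval (s, i-1)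
      refine ih (i + 1) (tmh ++ [(s, i - 1)]) false s ?_ ?_ (by simp)
      · rw [List.pairwise_append]
        exact ⟨h1, List.pairwise_singleton _ _, fun p hp q hq => by
          simp at hq; subst hq; exact (h3 rfl).1 p hp⟩
      · intro p hp
        rcases List.mem_append.mp hp with h | h
        · exact lt_trans (h2 p h) (by omega)
        · simp at h; subst h; have := (h3 rfl).2; omega

lemma find_tmh_pairwise (a : String) : (find_tmh a).Pairwise (fun p q => p.1 < q.1) :=
  findTmhGo_pairwise a.toList 0 [] false 0 (List.Pairwise.nil) (by simp) (by simp)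

-- per-predicted-helix: A's full inner scan counts the same as B's bisected window
lemma inner_count_eq (T : List (Int × Int)) (hT : T.Pairwise (fun p q => p.1 < q.1))
    (sp ep : Int) (c : Int) :
    T.foldl (fun c y =>
      match y with
      | (st, et) =>
        if |sp - st| ≤ 5 ∧ |ep - et| ≤ 5 ∧ (min ep et - max sp st) * 2 ≥ max (et - st) (ep - sp) then c + 1 else c) c
    = ((T.take (PySem.List.bisectRight (T.map Prod.fst) (sp + 5))).drop (PySem.List.bisectLeft (T.map Prod.fst) (sp - 5))).foldl
      (fun c y =>
        match y with
        | (st, et) =>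
          if |ep - et| ≤ 5 ∧ 2 * (min ep et - max sp st) ≥ max (et - st) (ep - sp) then c + 1 else c) c := by
  set starts := T.map Prod.fst with hstarts
  have hsorted : starts.Pairwise (fun a b => a ≤ b) := by
    rw [hstarts, List.pairwise_map]
    exact hT.imp (fun h => le_of_lt h)
  have hlen : starts.length = T.length := by simp [hstarts]
  obtain ⟨hlo_le, hlo_lt, hlo_ge⟩ := PySem.List.bisectLeft_spec starts (sp - 5) hsorted
  obtain ⟨hhi_le, hhi_lt, hhi_ge⟩ := PySem.List.bisectRight_spec starts (sp + 5) hsorted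
  set lo := PySem.List.bisectLeft starts (sp - 5) with hlo
  set hi := PySem.List.bisectRight starts (sp + 5) with hhi
  have hstart : ∀ (j : Nat) (hj : j < T.length), starts[j]'(by omega) = (T[j]).1 := by
    intro j hj; simp [hstarts]
  have hlohi : lo ≤ hi := by
    by_contra h
    rw [not_le] at h
    have hhiT : hi < T.length := by omega
    have h1 := hlo_lt hi (by omega) h
    have h2 := hhi_ge hi (by omega) (le_refl hi)
    omega
  -- bool forms of the two conditions
  set pA : Int × Int → Bool := fun y =>
    decide (|sp - y.1| ≤ 5 ∧ |ep - y.2| ≤ 5 ∧ (min ep y.2 - max sp y.1) * 2 ≥ max (y.2 - y.1) (ep - sp)) with hpA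
  set pB : Int × Int → Bool := fun y =>
    decide (|ep - y.2| ≤ 5 ∧ 2 * (min ep y.2 - max sp y.1) ≥ max (y.2 - y.1) (ep - sp)) with hpB
  have hfoldA : ∀ (l : List (Int × Int)) (c : Int),
      l.foldl (fun c y =>
        match y with
        | (st, et) =>
          if |sp - st| ≤ 5 ∧ |ep - et| ≤ 5 ∧ (min ep et - max sp st) * 2 ≥ max (et - st) (ep - sp) then c + 1 else c) c
      = l.foldl (fun acc x => if pA x then acc + 1 else acc) c := by
    intro l c
    apply PySem.List.foldl_congr_mem
    intro acc x _
    obtain ⟨st, et⟩ := x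
    simp [hpA]
  have hfoldB : ∀ (l : List (Int × Int)) (c : Int),
      l.foldl (fun c y =>
        match y with
        | (st, et) =>
          if |ep - et| ≤ 5 ∧ 2 * (min ep et - max sp st) ≥ max (et - st) (ep - sp) then c + 1 else c) c
      = l.foldl (fun acc x => if pB x then acc + 1 else acc) c := by
    intro l c
    apply PySem.List.foldl_congr_mem
    intro acc x _
    obtain ⟨st, et⟩ := x
    simp [hpB]
  rw [hfoldA, hfoldB, PySem.List.foldl_count_if, PySem.List.foldl_count_if]
  -- it remains to equate the two counts
  have hsplit : T = T.take lo ++ ((T.take hi).drop lo ++ T.drop hi) := by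
    have h1 : (T.take hi).take lo = T.take lo := by
      rw [List.take_take, min_eq_left hlohi]
    rw [← h1, ← List.append_assoc, List.take_append_drop, List.take_append_drop]
  have hpre : (T.take lo).countP pA = 0 := by
    rw [List.countP_eq_zero]
    intro x hx
    obtain ⟨k, hk, hkx⟩ := List.mem_iff_getElem.mp hx
    have hk' : k < lo ∧ k < T.length := by
      have := hk; simp [List.length_take] at this; omega
    have := hlo_lt k (by omega) hk'.1
    rw [hstart k hk'.2] at this
    have hx1 : x.1 < sp - 5 := by
      rw [← hkx, List.getElem_take]; exact this
    simp [hpA]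
    intro h; exfalso
    rw [abs_le] at h; omega
  have hsuf : (T.drop hi).countP pA = 0 := by
    rw [List.countP_eq_zero]
    intro x hx
    obtain ⟨k, hk, hkx⟩ := List.mem_iff_getElem.mp hx
    have hkT : hi + k < T.length := by
      have := hk; simp [List.length_drop] at this; omega
    have := hhi_ge (hi + k) (by omega) (by omega)
    rw [hstart (hi + k) hkT] at this
    have hx1 : sp + 5 < x.1 := by
      rw [← hkx, List.getElem_drop]; exact this
    simp [hpA]
    intro h; exfalso
    rw [abs_le] at h; omega
  have hmid : ((T.take hi).drop lo).countP pA = ((T.take hi).drop lo).countP pB := by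
    apply List.countP_congr
    intro x hx
    obtain ⟨k, hk, hkx⟩ := List.mem_iff_getElem.mp hx
    have hk' : lo + k < hi ∧ lo + k < T.length := by
      have := hk; simp [List.length_drop, List.length_take] at this; omega
    have hxT : x = T[lo + k]'(hk'.2) := by
      rw [← hkx, List.getElem_drop, List.getElem_take]
    have h1 := hlo_ge (lo + k) (by omega) (by omega)
    have h2 := hhi_lt (lo + k) (by omega) hk'.1
    rw [hstart (lo + k) hk'.2] at h1 h2
    rw [← hxT] at h1 h2
    simp [hpA, hpB]
    constructor
    · rintro ⟨_, h5, h6⟩; exact ⟨h5, by omega⟩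
    · rintro ⟨h5, h6⟩
      refine ⟨by rw [abs_le]; omega, h5, by omega⟩
  conv_lhs => rw [hsplit]
  rw [List.countP_append, List.countP_append, hpre, hsuf, hmid]
  push_cast
  ring

-- ===== VERDICT (by name: the statement is the Claim_ definition above) =====
theorem compare_prediction_spec : Claim_equal_compare_prediction := by
  intro name true_ pred _
  unfold Spec_compare_prediction compare_prediction compare_prediction_alt
  rw [intervals_eq_find_tmh, intervals_eq_find_tmh]
  refine congrArg₂ _ ?_ rfl
  apply PySem.List.foldl_congr_mem
  intro c x _
  obtain ⟨sp, ep⟩ := x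
  exact inner_count_eq (find_tmh true_) (find_tmh_pairwise true_) sp ep c
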